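-- pv_equiv track=rewrite | github.com/meelgroup/MUS-ASP | scripts/python/test_mus.py | check_mus_by_mus
-- ===== SOURCE A (Python) =====
-- def check_mus_by_mus(clingo_output, marco_output):
--     inconsistent = len(clingo_output) != len(marco_output)
--     if inconsistent == True:
--         return inconsistent
--     check_list = set()
--     for mus in clingo_output:
--         sorted_clauses = sorted(mus)
--         for index, marco_mus in enumerate(marco_output):
--             if index not in check_list and sorted_clauses == sorted(marco_mus):
--                 check_list.add(index)
--
--     inconsistent = len(clingo_output) != len(check_list)
--     return inconsistent
-- ===== SOURCE B (Python) =====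
-- def check_mus_by_mus(clingo_output, marco_output):
--     canon_clingo = sorted(sorted(mus) for mus in clingo_output)
--     canon_marco = sorted(sorted(mus) for mus in marco_output)
--     return canon_clingo != canon_marco
-- ===== Notes on version B (the rewrite author's own statement) =====
-- stated objective: faster
-- what changed: B canonicalizes each MUS by sorting its clauses and compares the two sorted lists of canonical forms (subsuming the length check), replacing A's greedy nested scan over marco_output that marks matched indices in a set.
-- intended difference: On equal-length inputs where every marco MUS is a permutation of some clingo MUS but the two collections differ as multisets of multisets (only possible with duplicate MUSes), A returns False (consistent) because its set of matched indices ignores multiplicities, while B returns True; the intended check is multiset equality, so B's answer is the right one. — e.g. on check_mus_by_mus([[1], [2]], [[1], [1]]): A returns false, B returns true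
import Mathlib
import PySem

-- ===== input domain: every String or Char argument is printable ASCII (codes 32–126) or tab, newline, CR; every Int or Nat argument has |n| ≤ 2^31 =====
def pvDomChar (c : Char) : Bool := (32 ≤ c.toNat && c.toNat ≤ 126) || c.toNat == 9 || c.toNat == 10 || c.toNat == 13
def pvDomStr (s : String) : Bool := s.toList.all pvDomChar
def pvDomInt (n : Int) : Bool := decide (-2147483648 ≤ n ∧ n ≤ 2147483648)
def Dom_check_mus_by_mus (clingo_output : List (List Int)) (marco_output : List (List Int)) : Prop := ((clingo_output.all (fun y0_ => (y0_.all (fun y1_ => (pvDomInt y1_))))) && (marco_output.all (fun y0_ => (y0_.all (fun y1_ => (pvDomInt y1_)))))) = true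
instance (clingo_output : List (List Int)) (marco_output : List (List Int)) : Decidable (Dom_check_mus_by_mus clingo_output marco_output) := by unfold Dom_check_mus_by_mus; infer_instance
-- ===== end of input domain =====

-- B replaces A's greedy nested index-marking over marco_output by canonicalizing every MUS
-- (sorting its clauses) and comparing the two sorted lists of canonical forms; on the
-- duplicate-heavy inputs of D_ below, where A's set-of-indices test hides multiplicities,
-- B returns the intended multiset comparison.

-- ===== PORT A =====
def check_mus_by_mus (clingo_output : List (List Int)) (marco_output : List (List Int)) : Bool :=
  if clingo_output.length ≠ marco_output.length then true
  else
    let check_list : PySem.Set Int :=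
      clingo_output.foldl (fun check_list mus =>
        let sorted_clauses := PySem.List.sorted mus (fun x => x) false
        (PySem.List.enumerate marco_output).foldl (fun check_list im =>
          if !(PySem.Set.contains check_list im.1) &&
             decide (sorted_clauses = PySem.List.sorted im.2 (fun x => x) false)
          then PySem.Set.add check_list im.1 else check_list) check_list)
        PySem.Set.empty
    decide (clingo_output.length ≠ PySem.Set.len check_list)

-- ===== PORT B =====
def check_mus_by_mus_alt (clingo_output : List (List Int)) (marco_output : List (List Int)) : Bool :=
  let canon_clingo := PySem.List.sorted
    (clingo_output.map (fun mus => PySem.List.sorted mus (fun x => x) false)) (fun x => x) false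
  let canon_marco := PySem.List.sorted
    (marco_output.map (fun mus => PySem.List.sorted mus (fun x => x) false)) (fun x => x) false
  decide (canon_clingo ≠ canon_marco)

-- ===== PRECONDITION & SPEC =====
-- On inputs where the two lists have equal length, every marco MUS is a permutation of some
-- clingo MUS, yet the two collections differ as multisets of multisets (possible only with
-- duplicates), A returns False ("consistent") because its set of matched indices hides
-- multiplicities, while B returns True; B's multiset comparison is the intended behaviour.
def pvToM (l : List Int) : Multiset Int := (l : Multiset Int)

def D_check_mus_by_mus (clingo_output : List (List Int)) (marco_output : List (List Int)) : Prop :=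
  clingo_output.length = marco_output.length ∧
  (∀ x ∈ marco_output, ∃ y ∈ clingo_output, x.Perm y) ∧
  Multiset.map pvToM (clingo_output : Multiset (List Int)) ≠
    Multiset.map pvToM (marco_output : Multiset (List Int))
instance (clingo_output : List (List Int)) (marco_output : List (List Int)) : Decidable (D_check_mus_by_mus clingo_output marco_output) := by unfold D_check_mus_by_mus; infer_instance

def Spec_check_mus_by_mus (clingo_output : List (List Int)) (marco_output : List (List Int)) (out : Bool) : Prop := ¬ D_check_mus_by_mus clingo_output marco_output → out = check_mus_by_mus_alt clingo_output marco_output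
instance (clingo_output : List (List Int)) (marco_output : List (List Int)) (out : Bool) : Decidable (Spec_check_mus_by_mus clingo_output marco_output out) := by unfold Spec_check_mus_by_mus; infer_instance

def pvDiffWitness_check_mus_by_mus : List (List Int) × List (List Int) := ([[1], [2]], [[1], [1]])
def pvDiffWitnessOut_check_mus_by_mus : Bool × Bool := (false, true)

-- ===== CLAIM (what is proved, stated in full; the proofs are below) =====
def Claim_unchanged_check_mus_by_mus : Prop := ∀ (clingo_output : List (List Int)) (marco_output : List (List Int)), Dom_check_mus_by_mus clingo_output marco_output → Spec_check_mus_by_mus clingo_output marco_output (check_mus_by_mus clingo_output marco_output)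
def Claim_changed_check_mus_by_mus : Prop := Dom_check_mus_by_mus (pvDiffWitness_check_mus_by_mus.1) (pvDiffWitness_check_mus_by_mus.2) ∧ D_check_mus_by_mus (pvDiffWitness_check_mus_by_mus.1) (pvDiffWitness_check_mus_by_mus.2) ∧ check_mus_by_mus (pvDiffWitness_check_mus_by_mus.1) (pvDiffWitness_check_mus_by_mus.2) = pvDiffWitnessOut_check_mus_by_mus.1 ∧ check_mus_by_mus_alt (pvDiffWitness_check_mus_by_mus.1) (pvDiffWitness_check_mus_by_mus.2) = pvDiffWitnessOut_check_mus_by_mus.2 ∧ pvDiffWitnessOut_check_mus_by_mus.1 ≠ pvDiffWitnessOut_check_mus_by_mus.2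
def Claim_exact_check_mus_by_mus : Prop := ∀ (clingo_output : List (List Int)) (marco_output : List (List Int)), Dom_check_mus_by_mus clingo_output marco_output → D_check_mus_by_mus clingo_output marco_output → check_mus_by_mus clingo_output marco_output ≠ check_mus_by_mus_alt clingo_output marco_output

-- ===== LEMMAS AND PROOFS =====

-- the canonical form computed by Python's sorted(mus)
def pvKey (l : List Int) : List Int := PySem.List.sorted l (fun x => x) false

theorem pvKey_eq_iff (x y : List Int) : pvKey x = pvKey y ↔ x.Perm y :=
  PySem.List.sorted_id_eq_sorted_id_iff_perm ..

-- sorting is well defined on multisets of clauses; used to invert pvToM-level equalities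
def pvSrt : Multiset Int → List Int :=
  Quotient.lift pvKey (fun a b h => (pvKey_eq_iff a b).mpr h)

theorem pvB_char (c m : List (List Int)) :
    check_mus_by_mus_alt c m = decide (¬ (c.map pvKey).Perm (m.map pvKey)) := by
  unfold check_mus_by_mus_alt
  have einst : (fun (a b : List Int) => a.decidableLT b) = (LinearOrder.toDecidableLT (α := List Int)) := by
    funext a b; exact Subsingleton.elim _ _
  rw [show (fun mus => PySem.List.sorted mus (fun x => x) false) = pvKey from rfl, einst]
  exact decide_eq_decide.mpr (not_congr (PySem.List.sorted_id_eq_sorted_id_iff_perm ..))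

theorem pvMem_key (c : List (List Int)) (x : List Int) :
    (∃ y ∈ c, x.Perm y) ↔ pvKey x ∈ c.map pvKey := by
  simp only [List.mem_map]
  constructor
  · rintro ⟨y, hy, hp⟩; exact ⟨y, hy, ((pvKey_eq_iff y x).mpr hp.symm)⟩
  · rintro ⟨y, hy, he⟩; exact ⟨y, hy, ((pvKey_eq_iff x y).mp he.symm)⟩

theorem pvPerm_key (c m : List (List Int)) :
    (c.map pvKey).Perm (m.map pvKey) ↔
      Multiset.map pvToM (c : Multiset (List Int)) = Multiset.map pvToM (m : Multiset (List Int)) := by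
  rw [← Multiset.coe_eq_coe, ← Multiset.map_coe, ← Multiset.map_coe]
  have e1 : ∀ s : Multiset (List Int), Multiset.map (pvToM ∘ pvKey) s = Multiset.map pvToM s := by
    intro s
    apply Multiset.map_congr rfl
    intro x _
    exact Multiset.coe_eq_coe.mpr (PySem.List.sorted_perm ..)
  have e2 : ∀ s : Multiset (List Int), Multiset.map (pvSrt ∘ pvToM) s = Multiset.map pvKey s := by
    intro s
    apply Multiset.map_congr rfl
    intro x _
    rfl
  constructor
  · intro h
    have := congrArg (Multiset.map pvToM) h
    rw [Multiset.map_map, Multiset.map_map, e1, e1] at this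
    exact this
  · intro h
    have := congrArg (Multiset.map pvSrt) h
    rw [Multiset.map_map, Multiset.map_map, e2, e2] at this
    exact this

-- the inner 'for index, marco_mus in enumerate(marco_output)' loop: it adds to the set exactly
-- the indices (offset by s) of marco MUSes whose canonical form equals sorted_clauses
theorem pvInner_spec (sc : List Int) (m : List (List Int)) : ∀ (s : Int) (cl : PySem.Set Int), cl.Nodup →
    ((PySem.List.enumerate m s).foldl (fun check_list im =>
        if !(PySem.Set.contains check_list im.1) &&
           decide (sc = PySem.List.sorted im.2 (fun x => x) false)
        then PySem.Set.add check_list im.1 else check_list) cl).Nodup ∧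
    (∀ j : Int, j ∈ ((PySem.List.enumerate m s).foldl (fun check_list im =>
        if !(PySem.Set.contains check_list im.1) &&
           decide (sc = PySem.List.sorted im.2 (fun x => x) false)
        then PySem.Set.add check_list im.1 else check_list) cl) ↔
      j ∈ cl ∨ ∃ k : Nat, ∃ _ : k < m.length, j = s + k ∧ sc = pvKey m[k]) := by
  induction m with
  | nil => intro s cl hcl; simp [PySem.List.enumerate_nil, hcl]
  | cons x xs ih =>
    intro s cl hcl
    rw [PySem.List.enumerate_cons]
    simp only [List.foldl_cons]
    set cl₁ := (if (!(PySem.Set.contains cl s) && decide (sc = PySem.List.sorted x (fun x => x) false)) = true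
        then PySem.Set.add cl s else cl) with hcl₁
    have hcond : ((!(PySem.Set.contains cl s) && decide (sc = PySem.List.sorted x (fun x => x) false)) = true)
        ↔ (s ∉ cl ∧ sc = pvKey x) := by
      simp only [Bool.and_eq_true, Bool.not_eq_true', decide_eq_true_eq, pvKey]
      rw [← PySem.Set.contains_iff cl s]
      simp
    have hnd₁ : cl₁.Nodup := by
      rw [hcl₁]; split
      · exact PySem.Set.nodup_add cl s hcl
      · exact hcl
    have hmem₁ : ∀ j : Int, j ∈ cl₁ ↔ j ∈ cl ∨ (j = s ∧ sc = pvKey x) := by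
      intro j
      rw [hcl₁]
      by_cases hs : s ∈ cl <;> by_cases hk : sc = pvKey x
      · rw [if_neg (by rw [hcond]; tauto)]
        constructor
        · tauto
        · rintro (h | ⟨rfl, _⟩) <;> [exact h; exact hs]
      · rw [if_neg (by rw [hcond]; tauto)]; tauto
      · rw [if_pos (hcond.mpr ⟨hs, hk⟩), PySem.Set.mem_add]; tauto
      · rw [if_neg (by rw [hcond]; tauto)]; tauto
    obtain ⟨hnd, hmem⟩ := ih (s + 1) cl₁ hnd₁
    refine ⟨hnd, fun j => ?_⟩
    rw [hmem j]
    simp only [hmem₁ j]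
    constructor
    · rintro ((h | ⟨rfl, hk⟩) | ⟨k, hk, rfl, hkey⟩)
      · exact Or.inl h
      · exact Or.inr ⟨0, by simp, by simp, by simpa using hk⟩
      · exact Or.inr ⟨k + 1, by simpa using hk, by push_cast; ring, by simpa using hkey⟩
    · rintro (h | ⟨k, hk, rfl, hkey⟩)
      · exact Or.inl (Or.inl h)
      · cases k with
        | zero => exact Or.inl (Or.inr ⟨by simp, by simpa using hkey⟩)
        | succ k => exact Or.inr ⟨k, by simpa using hk, by push_cast; ring, by simpa using hkey⟩

-- the outer 'for mus in clingo_output' loop: the final set holds exactly the indices of marco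
-- MUSes whose canonical form occurs among the canonical forms of clingo_output
theorem pvOuter_spec (m : List (List Int)) : ∀ (c : List (List Int)) (cl : PySem.Set Int), cl.Nodup →
    (c.foldl (fun check_list mus =>
        let sorted_clauses := PySem.List.sorted mus (fun x => x) false
        (PySem.List.enumerate m).foldl (fun check_list im =>
          if !(PySem.Set.contains check_list im.1) &&
             decide (sorted_clauses = PySem.List.sorted im.2 (fun x => x) false)
          then PySem.Set.add check_list im.1 else check_list) check_list) cl).Nodup ∧
    (∀ j : Int, j ∈ (c.foldl (fun check_list mus =>
        let sorted_clauses := PySem.List.sorted mus (fun x => x) false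
        (PySem.List.enumerate m).foldl (fun check_list im =>
          if !(PySem.Set.contains check_list im.1) &&
             decide (sorted_clauses = PySem.List.sorted im.2 (fun x => x) false)
          then PySem.Set.add check_list im.1 else check_list) check_list) cl) ↔
      j ∈ cl ∨ ∃ k : Nat, ∃ _ : k < m.length, j = (k : Int) ∧ pvKey m[k] ∈ c.map pvKey) := by
  intro c
  induction c with
  | nil => intro cl hcl; simp [hcl]
  | cons mus cs ih =>
    intro cl hcl
    simp only [List.foldl_cons]
    obtain ⟨hnd₁, hmem₁⟩ := pvInner_spec (PySem.List.sorted mus (fun x => x) false) m 0 cl hcl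
    obtain ⟨hnd, hmem⟩ := ih _ hnd₁
    refine ⟨hnd, fun j => ?_⟩
    rw [hmem j]
    simp only [hmem₁ j]
    constructor
    · rintro ((h | ⟨k, hk, rfl, hkey⟩) | ⟨k, hk, rfl, hkey⟩)
      · exact Or.inl h
      · exact Or.inr ⟨k, hk, by simp, by simp [List.mem_map]; exact Or.inl hkey.symm⟩
      · exact Or.inr ⟨k, hk, rfl, by simp [List.mem_map] at hkey ⊢; tauto⟩
    · rintro (h | ⟨k, hk, rfl, hkey⟩)
      · exact Or.inl (Or.inl h)
      · simp only [List.map_cons, List.mem_cons] at hkey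
        rcases hkey with hkey | hkey
        · exact Or.inl (Or.inr ⟨k, hk, by simp, hkey.symm⟩)
        · exact Or.inr ⟨k, hk, rfl, hkey⟩

-- on equal-length inputs A answers exactly "some marco MUS has no canonical match in clingo_output"
theorem pvA_char (c m : List (List Int)) (h : c.length = m.length) :
    check_mus_by_mus c m = decide (¬ ∀ x ∈ m, pvKey x ∈ c.map pvKey) := by
  unfold check_mus_by_mus
  rw [if_neg (by simp [h])]
  obtain ⟨hndS, hmemS⟩ := pvOuter_spec m c PySem.Set.empty (by exact List.nodup_nil)
  set S := c.foldl (fun check_list mus =>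
        let sorted_clauses := PySem.List.sorted mus (fun x => x) false
        (PySem.List.enumerate m).foldl (fun check_list im =>
          if !(PySem.Set.contains check_list im.1) &&
             decide (sorted_clauses = PySem.List.sorted im.2 (fun x => x) false)
          then PySem.Set.add check_list im.1 else check_list) check_list) PySem.Set.empty with hS
  set R := ((PySem.List.enumerate m).filter (fun im => decide (pvKey im.2 ∈ c.map pvKey))).map Prod.fst with hR
  have hndR : R.Nodup := by
    have h1 := (PySem.List.pairwise_lt_enumerate m 0).filter (fun im => decide (pvKey im.2 ∈ c.map pvKey))
    have h2 : R.Pairwise (· < ·) := List.pairwise_map.mpr h1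
    exact h2.imp ne_of_lt
  have hmemR : ∀ j : Int, j ∈ R ↔ ∃ k : Nat, ∃ _ : k < m.length, j = (k : Int) ∧ pvKey m[k] ∈ c.map pvKey := by
    intro j
    rw [hR]
    simp only [List.mem_map, List.mem_filter, PySem.List.mem_enumerate_iff]
    constructor
    · rintro ⟨im, ⟨⟨k, hk, rfl⟩, hp⟩, rfl⟩
      exact ⟨k, hk, by simp, by simpa using hp⟩
    · rintro ⟨k, hk, rfl, hp⟩
      exact ⟨((k : Int), m[k]), ⟨⟨k, hk, by simp⟩, by simpa using hp⟩, rfl⟩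
  have hperm : S.Perm R := (List.perm_ext_iff_of_nodup hndS hndR).mpr (fun j => by rw [hmemS j, hmemR j]; simp)
  have hlenS : S.length = R.length := hperm.length_eq
  have hlenR : R.length = m.countP (fun x => decide (pvKey x ∈ c.map pvKey)) := by
    rw [hR, List.length_map, ← List.countP_eq_length_filter]
    conv_rhs => rw [← PySem.List.map_snd_enumerate m 0, List.countP_map]
    rfl
  have hlen : PySem.Set.len S = (m.countP (fun x => decide (pvKey x ∈ c.map pvKey)) : Int) := by
    simp [PySem.Set.len, hlenS, hlenR]
  show decide ((c.length : Int) ≠ PySem.Set.len S) = decide (¬ ∀ x ∈ m, pvKey x ∈ c.map pvKey)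
  rw [hlen]
  apply decide_eq_decide.mpr
  rw [h]
  have hiff : (∀ x ∈ m, pvKey x ∈ c.map pvKey) ↔
      List.countP (fun x => decide (pvKey x ∈ List.map pvKey c)) m = m.length := by
    rw [List.countP_eq_length]; simp
  rw [not_iff_not.mpr hiff]
  constructor
  · intro hne heq; exact hne (by exact_mod_cast heq.symm)
  · intro hne heq; exact hne (by exact_mod_cast heq.symm)

-- ===== VERDICT (by name: the statement is the Claim_ definition above) =====
theorem check_mus_by_mus_spec : Claim_unchanged_check_mus_by_mus := by
  intro c m _ hD
  rw [pvB_char]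
  by_cases hlen : c.length = m.length
  · by_cases hall : ∀ x ∈ m, pvKey x ∈ c.map pvKey
    · by_cases hperm : (c.map pvKey).Perm (m.map pvKey)
      · rw [pvA_char c m hlen, decide_eq_false (not_not_intro hall), decide_eq_false (not_not_intro hperm)]
      · exact absurd ⟨hlen, fun x hx => (pvMem_key c x).mpr (hall x hx),
          fun he => hperm ((pvPerm_key c m).mpr he)⟩ hD
    · rw [pvA_char c m hlen]
      have hnp : ¬ (c.map pvKey).Perm (m.map pvKey) := by
        intro hp
        obtain ⟨x, hx, hnx⟩ := not_forall₂.mp hall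
        exact hnx (hp.mem_iff.mpr (List.mem_map_of_mem hx))
      rw [decide_eq_true hnp, decide_eq_true hall]
  · unfold check_mus_by_mus
    rw [if_pos (by simpa using hlen)]
    have hnp : ¬ (c.map pvKey).Perm (m.map pvKey) := by
      intro hp
      exact hlen (by simpa using hp.length_eq)
    rw [decide_eq_true hnp]

theorem check_mus_by_mus_changed : Claim_changed_check_mus_by_mus := by
  unfold Claim_changed_check_mus_by_mus; decide

theorem check_mus_by_mus_tight : Claim_exact_check_mus_by_mus := by
  intro c m _ hD
  obtain ⟨hlen, hall', hne⟩ := hD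
  have hall : ∀ x ∈ m, pvKey x ∈ c.map pvKey := fun x hx => (pvMem_key c x).mp (hall' x hx)
  have hnp : ¬ (c.map pvKey).Perm (m.map pvKey) := fun hp => hne ((pvPerm_key c m).mp hp)
  rw [pvA_char c m hlen, pvB_char, decide_eq_false (not_not_intro hall), decide_eq_true hnp]
  simp
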